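-- pv_equiv track=rewrite | github.com/jangseungwon08/coding-test | 프로그래머스/0/181890. 왼쪽 오른쪽/왼쪽 오른쪽.py | solution
-- ===== SOURCE A (Python) =====
-- def solution(str_list):
--     answer = []
--     #str_list인덱스로 순회하면서
--     for i in range(len(str_list)):
--         #str_list의 i번째 인덱스 value값이 "l"일 때
--         if str_list[i] == "l":
--             #str_list리스트에서 i-1번째 까지 리턴
--             return str_list[:i]
--         # 'r'일 때
--         elif str_list[i] == "r":
--             #i+1번째 부터 끝까지 리턴
--             return str_list[i+1:]
--     #for문이 끝나면 빈 문자열 리턴 ( l이나 r이 없다는 뜻)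
--     return []
-- ===== SOURCE B (Python) =====
-- def solution(str_list):
--     try:
--         li = str_list.index('l')
--     except ValueError:
--         li = len(str_list) + 1
--     try:
--         ri = str_list.index('r')
--     except ValueError:
--         ri = len(str_list) + 1
--     if li == ri:  # only possible when neither 'l' nor 'r' occurs
--         return []
--     if li < ri:
--         return str_list[:li]
--     return str_list[ri + 1:]
-- ===== Notes on version B (the rewrite author's own statement) =====
-- stated objective: simpler
-- what changed: Replaces the fused index-loop with early returns by locating the first 'l' and first 'r' independently via list.index (sentinel len+1 when absent) and deciding once by comparing the two positions.
import Mathlib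
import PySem

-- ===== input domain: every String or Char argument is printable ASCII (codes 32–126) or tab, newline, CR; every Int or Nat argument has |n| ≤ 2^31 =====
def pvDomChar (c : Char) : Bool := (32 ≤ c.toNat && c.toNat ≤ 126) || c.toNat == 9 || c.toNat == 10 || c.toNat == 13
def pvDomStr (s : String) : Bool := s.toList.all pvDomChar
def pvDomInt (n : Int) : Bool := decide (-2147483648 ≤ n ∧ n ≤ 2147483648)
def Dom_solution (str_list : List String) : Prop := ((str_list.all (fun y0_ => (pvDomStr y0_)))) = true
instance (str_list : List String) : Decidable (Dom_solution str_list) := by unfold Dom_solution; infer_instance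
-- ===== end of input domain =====

-- B locates the first 'l' and first 'r' independently (sentinel length+1 when absent)
-- and decides once by comparing the two positions, instead of A's fused early-return scan: simpler decomposition.


-- ===== PORT A =====
-- the 'for i in range(len(str_list))' loop with early returns, as recursion on i
def solutionGo (xs : List String) (i : Nat) : List String :=
  if h : i < xs.length then
    if xs[i] = "l" then PySem.List.slice xs none (some (i : Int))        -- str_list[:i]
    else if xs[i] = "r" then PySem.List.slice xs (some ((i : Int) + 1)) none  -- str_list[i+1:]
    else solutionGo xs (i + 1)
  else []
termination_by xs.length - i

def solution (str_list : List String) : List String := solutionGo str_list 0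

-- ===== PORT B =====
def solution_alt (str_list : List String) : List String :=
  let li := (PySem.List.index? str_list "l").getD (str_list.length + 1)
  let ri := (PySem.List.index? str_list "r").getD (str_list.length + 1)
  if li = ri then []
  else if li < ri then PySem.List.slice str_list none (some (li : Int))
  else PySem.List.slice str_list (some ((ri : Int) + 1)) none

-- ===== PRECONDITION & SPEC =====
def Spec_solution (str_list : List String) (out : List String) : Prop := out = solution_alt str_list
instance (str_list : List String) (out : List String) : Decidable (Spec_solution str_list out) := by unfold Spec_solution; infer_instance

-- ===== CLAIM (what is proved, stated in full; the proofs are below) =====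
def Claim_equal_solution : Prop := ∀ (str_list : List String), Dom_solution str_list → Spec_solution str_list (solution str_list)

-- ===== LEMMAS AND PROOFS =====

-- if v occurs at position i and nowhere earlier, index? finds it there
theorem index?_eq_of_first (xs : List String) (v : String) (i : Nat) (hi : i < xs.length)
    (hv : xs[i] = v) (hmin : ∀ j (hj : j < xs.length), j < i → xs[j] ≠ v) :
    PySem.List.index? xs v = some i := by
  rw [PySem.List.index?_eq_some_iff]
  refine ⟨xs.take i, xs.drop (i + 1), ?_, by simp [Nat.le_of_lt hi], ?_⟩
  · conv_lhs => rw [← List.take_append_drop i xs]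
    rw [List.drop_eq_getElem_cons hi, hv]
  · intro hmem
    obtain ⟨j, hj, hjv⟩ := List.getElem_of_mem hmem
    have hjlen : j < i := (by simpa using hj : j < i ∧ j < xs.length).1
    have := hmin j (lt_of_lt_of_le hjlen (Nat.le_of_lt hi)) hjlen
    rw [List.getElem_take] at hjv
    exact this hjv

-- if v never occurs before position i, any occurrence index (or the sentinel) is ≥ i
theorem index?_ge_of_none_before (xs : List String) (v : String) (i : Nat)
    (hile : i ≤ xs.length + 1)
    (hmin : ∀ j (hj : j < xs.length), j < i → xs[j] ≠ v) :
    i ≤ (PySem.List.index? xs v).getD (xs.length + 1) := by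
  cases hk : PySem.List.index? xs v with
  | none => simpa using hile
  | some k =>
      obtain ⟨hk', hkv, _⟩ := PySem.List.getElem_of_index?_eq_some hk
      simp only [Option.getD_some]
      by_contra h
      exact hmin k hk' (by omega) hkv

theorem index?_eq_none_of_none_anywhere (xs : List String) (v : String)
    (hmin : ∀ j (hj : j < xs.length), xs[j] ≠ v) :
    PySem.List.index? xs v = none := by
  rw [PySem.List.index?_eq_none_iff]
  intro hm
  obtain ⟨j, hj, hjv⟩ := List.getElem_of_mem hm
  exact hmin j hj hjv

-- main loop invariant: if neither 'l' nor 'r' occurs before i, the loop from i computes B's answer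
theorem go_eq (xs : List String) : ∀ n i, n = xs.length - i → i ≤ xs.length →
    (∀ j (hj : j < xs.length), j < i → xs[j] ≠ "l" ∧ xs[j] ≠ "r") →
    solutionGo xs i = solution_alt xs := by
  intro n
  induction n with
  | zero =>
      intro i hn hile hmin
      have hieq : i = xs.length := by omega
      rw [solutionGo, dif_neg (by omega)]
      unfold solution_alt
      rw [index?_eq_none_of_none_anywhere xs "l" (fun j hj => (hmin j hj (by omega)).1),
          index?_eq_none_of_none_anywhere xs "r" (fun j hj => (hmin j hj (by omega)).2)]
      simp
  | succ n ihn =>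
      intro i hn hile hmin
      have hi : i < xs.length := by omega
      rw [solutionGo, dif_pos hi]
      by_cases hL : xs[i] = "l"
      · rw [if_pos hL]
        have hli : PySem.List.index? xs "l" = some i :=
          index?_eq_of_first xs "l" i hi hL (fun j hj hji => (hmin j hj hji).1)
        have hri : i + 1 ≤ (PySem.List.index? xs "r").getD (xs.length + 1) := by
          refine index?_ge_of_none_before xs "r" (i + 1) (by omega) ?_
          intro j hj hji
          rcases Nat.lt_succ_iff_lt_or_eq.mp hji with h | h
          · exact (hmin j hj h).2
          · subst h; rw [hL]; decide
        unfold solution_alt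
        rw [hli]
        simp only [Option.getD_some]
        rw [if_neg (by omega), if_pos (by omega)]
      · by_cases hR : xs[i] = "r"
        · rw [if_neg hL, if_pos hR]
          have hri : PySem.List.index? xs "r" = some i :=
            index?_eq_of_first xs "r" i hi hR (fun j hj hji => (hmin j hj hji).2)
          have hli : i + 1 ≤ (PySem.List.index? xs "l").getD (xs.length + 1) := by
            refine index?_ge_of_none_before xs "l" (i + 1) (by omega) ?_
            intro j hj hji
            rcases Nat.lt_succ_iff_lt_or_eq.mp hji with h | h
            · exact (hmin j hj h).1
            · subst h; rw [hR]; decide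
          unfold solution_alt
          rw [hri]
          simp only [Option.getD_some]
          rw [if_neg (by omega), if_neg (by omega)]
        · rw [if_neg hL, if_neg hR]
          refine ihn (i + 1) (by omega) (by omega) ?_
          intro j hj hji
          rcases Nat.lt_succ_iff_lt_or_eq.mp hji with h | h
          · exact hmin j hj h
          · subst h; exact ⟨hL, hR⟩

-- ===== VERDICT (by name: the statement is the Claim_ definition above) =====
theorem solution_spec : Claim_equal_solution := by
  intro xs _
  unfold Spec_solution solution
  exact go_eq xs (xs.length - 0) 0 rfl (Nat.zero_le _) (by omega)
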